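-- pv_equiv track=rewrite | github.com/bing1100/random | thue_morse_word.py | gen_empty_locs
-- ===== SOURCE A (Python) =====
-- def length(k):
--     if k == 0:
--         return 1
--     elif k % 2 == 1:
--         return 2*length(k - 1)
--     else:
--         return 2*length(k - 1) + 1
--
-- def gen_empty_locs(k):
--
--     list_blanks = []
--
--     idx = 0
--     for i in range(k):
--         if i % 2 == 1:
--             idx = length(i) + 1
--             list_blanks.append(idx)
--
--         else:
--             idx += length(i)
--             list_blanks.append(idx)
--
--
--     return list_blanks[1:]
-- ===== SOURCE B (Python) =====
-- def gen_empty_locs(k):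
--     # Closed form: length(i) == 2**(i+2)//3, and the running index telescopes to
--     # 2**(i+1) for even i and (2**(i+2)+1)//3 for odd i (the first entry is dropped).
--     return [2 ** (i + 1) if i % 2 == 0 else (2 ** (i + 2) + 1) // 3
--             for i in range(1, k)]
-- ===== Notes on version B (the rewrite author's own statement) =====
-- stated objective: faster
-- what changed: Replaced the loop that re-runs the O(i) recursion length(i) at every iteration and threads a running idx accumulator by a direct closed form per position (2**(i+1) for even i, (2**(i+2)+1)//3 for odd i), emitted as a single comprehension with no accumulator.
import Mathlib
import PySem

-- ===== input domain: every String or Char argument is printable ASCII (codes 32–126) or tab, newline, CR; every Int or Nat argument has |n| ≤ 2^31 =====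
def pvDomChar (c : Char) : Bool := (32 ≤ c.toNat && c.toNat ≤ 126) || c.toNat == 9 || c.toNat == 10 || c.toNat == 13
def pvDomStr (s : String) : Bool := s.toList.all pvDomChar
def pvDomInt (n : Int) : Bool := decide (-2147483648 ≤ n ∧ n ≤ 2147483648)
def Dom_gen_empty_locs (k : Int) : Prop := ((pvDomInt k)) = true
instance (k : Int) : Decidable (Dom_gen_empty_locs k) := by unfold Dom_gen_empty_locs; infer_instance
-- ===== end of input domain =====

-- B replaces A's loop, which re-runs the recursive length(i) at every iteration and
-- threads a running idx accumulator, by a per-position closed form (objective: faster).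

-- ===== PORT A =====
-- length(k); Python diverges for k < 0 (never reached from gen_empty_locs); the 'k ≤ 0'
-- guard only makes the Lean recursion total, values for k ≥ 0 are exactly Python's.
def lengthA (k : Int) : Int :=
  if k ≤ 0 then 1
  else if k % 2 == 1 then 2 * lengthA (k - 1)
  else 2 * lengthA (k - 1) + 1
termination_by k.toNat
decreasing_by all_goals omega

-- loop body of A: state = (idx, list_blanks)
def stepA (s : Int × List Int) (i : Int) : Int × List Int :=
  if i % 2 == 1 then (lengthA i + 1, s.2 ++ [lengthA i + 1])
  else (s.1 + lengthA i, s.2 ++ [s.1 + lengthA i])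

def gen_empty_locs (k : Int) : List Int :=
  ((PySem.List.pyRange 0 k 1).foldl stepA (0, [])).2.drop 1  -- list_blanks[1:]

-- ===== PORT B =====
def gen_empty_locs_alt (k : Int) : List Int :=
  (PySem.List.pyRange 1 k 1).map (fun i =>
    if i % 2 == 0 then 2 ^ (i + 1).toNat            -- 2**(i+1); i ≥ 1 so exponent exact
    else PySem.Int.floordiv (2 ^ (i + 2).toNat + 1) 3)

-- ===== PRECONDITION & SPEC =====
def Spec_gen_empty_locs (k : Int) (out : List Int) : Prop := out = gen_empty_locs_alt k
instance (k : Int) (out : List Int) : Decidable (Spec_gen_empty_locs k out) := by unfold Spec_gen_empty_locs; infer_instance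

-- ===== CLAIM (what is proved, stated in full; the proofs are below) =====
def Claim_equal_gen_empty_locs : Prop := ∀ (k : Int), Dom_gen_empty_locs k → Spec_gen_empty_locs k (gen_empty_locs k)

-- ===== LEMMAS AND PROOFS =====

-- value appended at iteration i of A's loop
def vA (i : Nat) : Int :=
  if i = 0 then 1 else if i % 2 = 1 then lengthA (i : Int) + 1 else 2 ^ (i + 1)

-- idx entering iteration n of A's loop
def idxA : Nat → Int
  | 0 => 0
  | n + 1 => vA n

theorem lengthA_three (n : Nat) :
    3 * lengthA (n : Int) = 2 ^ (n + 2) - (if n % 2 = 0 then 1 else 2) := by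
  induction n with
  | zero => simp [lengthA]
  | succ n ih =>
    rw [show ((n + 1 : Nat) : Int) = (n : Int) + 1 by push_cast; ring, lengthA]
    have h0 : ¬ ((n : Int) + 1 ≤ 0) := by omega
    have h1 : (((n : Int) + 1) % 2 == 1) = decide (n % 2 = 0) := by
      by_cases h : n % 2 = 0 <;> simp [h] <;> omega
    rw [if_neg h0, h1]
    have h2 : (2 : Int) ^ (n + 1 + 2) = 2 * 2 ^ (n + 2) := by ring
    have h3 : ((n : Int) + 1 - 1) = (n : Int) := by ring
    rw [h3]
    by_cases h : n % 2 = 0 <;> simp [h] at ih ⊢ <;> omega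

theorem foldl_stepA (n : Nat) :
    (PySem.List.pyRange 0 (n : Int) 1).foldl stepA (0, []) =
      (idxA n, (List.range n).map vA) := by
  induction n with
  | zero => simp [PySem.List.pyRange_one_eq_nil, idxA]
  | succ n ih =>
    rw [show ((n + 1 : Nat) : Int) = (n : Int) + 1 by push_cast; ring,
        PySem.List.pyRange_one_succ_right (by omega : (0 : Int) ≤ (n : Int)),
        List.foldl_append, ih, List.range_succ, List.map_append]
    rcases Nat.eq_zero_or_pos n with h0 | hpos
    · subst h0; simp [stepA, idxA, vA, lengthA]
    by_cases hpar : n % 2 = 1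
    · -- odd iteration: idx := length(n) + 1
      have h1 : ((n : Int) % 2 == 1) = true := by simp; omega
      simp [stepA, h1, idxA, vA, hpar, Nat.pos_iff_ne_zero.mp hpos]
    · -- even iteration, n ≥ 2: idx := vA (n-1) + length(n) = 2^(n+1)
      obtain ⟨m, rfl⟩ : ∃ m, n = m + 1 := ⟨n - 1, by omega⟩
      have hm : m % 2 = 1 := by omega
      have h1 : (((m : Int) + 1) % 2 == 1) = false := by simp; omega
      have hm0 : ¬ m = 0 := by omega
      have hm1 : ¬ (m + 1) = 0 := by omega
      have hmp : ¬ (m + 1) % 2 = 1 := by omega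
      have hv : vA m = lengthA (m : Int) + 1 := by
        simp [vA, hm0, hm]
      have hv2 : vA (m + 1) = 2 ^ (m + 2) := by
        simp [vA, hmp]
      have e1 := lengthA_three m
      have e2 := lengthA_three (m + 1)
      rw [if_neg (by omega : ¬ m % 2 = 0)] at e1
      rw [if_pos (by omega : (m + 1) % 2 = 0)] at e2
      rw [show ((m + 1 : Nat) : Int) = (m : Int) + 1 by push_cast; ring] at e2
      rw [show (2 : Int) ^ (m + 1 + 2) = 2 * 2 ^ (m + 2) by ring] at e2
      have harith : lengthA (m : Int) + 1 + lengthA ((m : Int) + 1) = 2 ^ (m + 2) := by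
        generalize (2 : Int) ^ (m + 2) = P at e1 e2 ⊢
        omega
      rw [show ((m + 1 : Nat) : Int) = (m : Int) + 1 by push_cast; ring]
      simp only [List.foldl_cons, List.foldl_nil, stepA, h1, Bool.false_eq_true,
        if_false, idxA, hv, hv2, harith, List.map_cons, List.map_nil]

theorem vA_eq_alt (j : Nat) (hj : 1 ≤ j) :
    vA j = if ((j : Int) % 2 == 0) then 2 ^ ((j : Int) + 1).toNat
           else PySem.Int.floordiv (2 ^ ((j : Int) + 2).toNat + 1) 3 := by
  have ht1 : ((j : Int) + 1).toNat = j + 1 := by omega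
  have ht2 : ((j : Int) + 2).toNat = j + 2 := by omega
  by_cases h : j % 2 = 0
  · have hb : ((j : Int) % 2 == 0) = true := by simp; omega
    rw [hb, if_pos rfl, ht1]
    have hj0 : ¬ j = 0 := by omega
    have hj1 : ¬ j % 2 = 1 := by omega
    simp [vA, hj0, hj1]
  · have hb : ((j : Int) % 2 == 0) = false := by simp; omega
    rw [hb]
    simp only [Bool.false_eq_true, if_false, ht2]
    have e1 := lengthA_three j
    rw [if_neg h] at e1
    have h2 : (2 : Int) ^ (j + 2) + 1 = 3 * (lengthA (j : Int) + 1) := by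
      generalize (2 : Int) ^ (j + 2) = P at e1 ⊢
      omega
    rw [h2, PySem.Int.floordiv_eq_ediv_of_pos (by omega),
        Int.mul_ediv_cancel_left _ (by omega : (3 : Int) ≠ 0)]
    have hj0 : ¬ j = 0 := by omega
    simp [vA, hj0, (by omega : j % 2 = 1)]

theorem gen_eq (k : Int) : gen_empty_locs k = gen_empty_locs_alt k := by
  by_cases hk : k ≤ 0
  case pos =>
    rw [gen_empty_locs, gen_empty_locs_alt,
        PySem.List.pyRange_one_eq_nil hk,
        PySem.List.pyRange_one_eq_nil (by omega : k ≤ 1)]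
    simp
  case neg =>
    obtain ⟨n, rfl⟩ : ∃ n : Nat, k = (n : Int) := ⟨k.toNat, by omega⟩
    rw [gen_empty_locs, foldl_stepA, gen_empty_locs_alt, PySem.List.pyRange_one]
    have hlen : ((n : Int) - 1).toNat = n - 1 := by omega
    rw [hlen]
    apply List.ext_getElem
    · simp
    · intro i h1 h2
      simp only [List.getElem_drop, List.getElem_map, List.getElem_range]
      have hi : 1 + i < n := by
        have h2' := h2; simp at h2'; omega
      have : (1 + (i : Int)) = (((1 + i : Nat)) : Int) := by push_cast; ring
      rw [this, vA_eq_alt (1 + i) (by omega)]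

-- ===== VERDICT (by name: the statement is the Claim_ definition above) =====
theorem gen_empty_locs_spec : Claim_equal_gen_empty_locs := by
  intro k _
  exact gen_eq k
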